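-- pv_equiv track=rewrite | github.com/desaiparv5/EPI-Solutions | dynamic_programming/traverse_2d_array.py | traverse_2d_array_6
-- ===== SOURCE A (Python) =====
-- def traverse_2d_array_6(k):
--     # Call a decimal number D, as defined above, strictly monotone if D[i] < D[i+1], 0 < i < |D|.
--     # Write a program which takes as input a positive integer k and computes the number of decirnal
--     # numbers of length k that are strictly monotone.
--     digits = 9
--     dp = [[0]*digits for _ in range(k)]
--     dp[0][0] = 1
--     for col in range(1, digits):
--         dp[0][col] = 1 + dp[0][col-1]
--
--     for col in range(1, digits):
--         for row in range(1, k):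
--             dp[row][col] = dp[row-1][col-1] + dp[row][col-1]
--     return dp[-1][-1]
-- ===== SOURCE B (Python) =====
-- def traverse_2d_array_6(k):
--     # Count of strictly monotone k-digit numbers = C(9, k), computed directly.
--     if k > 9:
--         return 0
--     c = 1
--     for i in range(k):
--         c = c * (9 - i) // (i + 1)
--     return c
-- ===== Notes on version B (the rewrite author's own statement) =====
-- stated objective: faster
-- what changed: Replaced the k x 9 Pascal-style DP table with the closed-form binomial coefficient C(9,k) computed by a short multiplicative loop of at most 9 steps (0 immediately for k>9).
import Mathlib
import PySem

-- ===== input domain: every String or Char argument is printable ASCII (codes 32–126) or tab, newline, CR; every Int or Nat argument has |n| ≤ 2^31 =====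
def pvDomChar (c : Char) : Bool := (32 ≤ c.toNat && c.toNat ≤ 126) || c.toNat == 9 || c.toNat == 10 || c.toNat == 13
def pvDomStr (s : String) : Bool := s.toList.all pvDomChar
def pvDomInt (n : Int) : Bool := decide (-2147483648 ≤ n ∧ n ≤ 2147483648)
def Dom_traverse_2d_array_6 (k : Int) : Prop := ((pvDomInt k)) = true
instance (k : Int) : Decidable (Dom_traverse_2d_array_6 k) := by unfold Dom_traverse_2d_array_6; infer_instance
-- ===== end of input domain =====

-- B replaces the k×9 Pascal-style DP table with the closed-form binomial C(9,k)
-- computed by a loop of at most 9 multiplicative steps (objective: faster).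

-- ===== PORT A =====
-- dp[r][c] = v  (Python's in-place row mutation, expressed functionally)
def pvUpd (dp : List (List Int)) (r c : Nat) (v : Int) : List (List Int) :=
  dp.set r ((dp.getD r []).set c v)

-- dp[r][c]  (under Pre_ every read the loops perform is in range, so the default never shows)
def pvGet (dp : List (List Int)) (r c : Nat) : Int :=
  (dp.getD r []).getD c 0

def traverse_2d_array_6 (k : Int) : Int :=
  let digits : Int := 9
  -- dp = [[0]*digits for _ in range(k)]
  let dp : List (List Int) := (PySem.List.pyRange 0 k 1).map (fun _ => List.replicate 9 (0 : Int))
  -- dp[0][0] = 1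
  let dp := pvUpd dp 0 0 1
  -- for col in range(1, digits): dp[0][col] = 1 + dp[0][col-1]
  let dp := (PySem.List.pyRange 1 digits 1).foldl
    (fun dp col => pvUpd dp 0 col.toNat (1 + pvGet dp 0 (col.toNat - 1))) dp
  -- for col in range(1, digits): for row in range(1, k): dp[row][col] = dp[row-1][col-1] + dp[row][col-1]
  let dp := (PySem.List.pyRange 1 digits 1).foldl
    (fun dp col => (PySem.List.pyRange 1 k 1).foldl
      (fun dp row => pvUpd dp row.toNat col.toNat
        (pvGet dp (row.toNat - 1) (col.toNat - 1) + pvGet dp row.toNat (col.toNat - 1))) dp) dp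
  -- return dp[-1][-1]
  match PySem.List.pyGet? dp (-1) with
  | some lastRow => (PySem.List.pyGet? lastRow (-1)).getD 0
  | none => 0

-- ===== PORT B =====
def traverse_2d_array_6_alt (k : Int) : Int :=
  if k > 9 then 0
  else (PySem.List.pyRange 0 k 1).foldl
    (fun c i => PySem.Int.floordiv (c * (9 - i)) (i + 1)) 1

-- ===== PRECONDITION & SPEC =====
-- A raises IndexError (dp[0][0] on an empty dp) for every k ≤ 0, so Pre_ is exactly k ≥ 1.
def Pre_traverse_2d_array_6 (k : Int) : Prop := 1 ≤ k
instance (k : Int) : Decidable (Pre_traverse_2d_array_6 k) := by unfold Pre_traverse_2d_array_6; infer_instance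
def pvWitness_traverse_2d_array_6 : Int := 2

def Spec_traverse_2d_array_6 (k : Int) (out : Int) : Prop := out = traverse_2d_array_6_alt k
instance (k : Int) (out : Int) : Decidable (Spec_traverse_2d_array_6 k out) := by unfold Spec_traverse_2d_array_6; infer_instance

-- ===== CLAIM (what is proved, stated in full; the proofs are below) =====
def Claim_equal_traverse_2d_array_6 : Prop := ∀ (k : Int), Dom_traverse_2d_array_6 k → Pre_traverse_2d_array_6 k → Spec_traverse_2d_array_6 k (traverse_2d_array_6 k)

-- ===== LEMMAS AND PROOFS =====

-- generic: a property preserved by every step of a foldl holds at the end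
theorem pvFoldlInv {α β : Type} (P : α → Prop) (f : α → β → α) :
    ∀ (l : List β) (a : α), (∀ a b, b ∈ l → P a → P (f a b)) → P a → P (l.foldl f a) := by
  intro l
  induction l with
  | nil => intro a _ h; simpa using h
  | cons x xs ih =>
      intro a hstep h
      simp only [List.foldl_cons]
      exact ih _ (fun a b hb => hstep a b (List.mem_cons_of_mem _ hb)) (hstep a x (by simp) h)

theorem pvGetD_set {α : Type} (l : List α) (i : Nat) (x : α) (j : Nat) (d : α) :
    (l.set i x).getD j d = if i = j ∧ i < l.length then x else l.getD j d := by
  rw [List.getD_eq_getElem?_getD, List.getElem?_set]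
  by_cases h1 : i = j
  · subst h1
    by_cases h2 : i < l.length
    · simp [h2]
    · simp [h2, List.getD_eq_getElem?_getD]
  · simp [h1, List.getD_eq_getElem?_getD]

-- how one Python assignment dp[r][c] = v changes a read dp[r'][c']
theorem pvGet_upd (dp : List (List Int)) (r c : Nat) (v : Int) (r' c' : Nat) :
    pvGet (pvUpd dp r c v) r' c' =
      if r = r' ∧ r < dp.length ∧ c = c' ∧ c < (dp.getD r []).length then v
      else pvGet dp r' c' := by
  unfold pvGet pvUpd
  rw [pvGetD_set]
  by_cases h1 : r = r' ∧ r < dp.length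
  · rw [if_pos h1]
    obtain ⟨e, hlen⟩ := h1; subst e
    rw [pvGetD_set]
    by_cases h2 : c = c' ∧ c < (dp.getD r []).length
    · rw [if_pos h2, if_pos ⟨rfl, hlen, h2⟩]
    · rw [if_neg h2, if_neg (by tauto)]
  · rw [if_neg h1, if_neg (by tauto)]

-- the shape invariant plus "strictly-below-diagonal entries are zero"
def pvGood (n : Nat) (dp : List (List Int)) : Prop :=
  dp.length = n ∧ (∀ row ∈ dp, row.length = 9) ∧
  (∀ r c : Nat, c < r → pvGet dp r c = 0)

theorem pvGood_upd {n : Nat} {dp : List (List Int)} {r c : Nat} {v : Int}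
    (h : pvGood n dp) (hz : c < r → v = 0) :
    pvGood n (pvUpd dp r c v) := by
  obtain ⟨hlen, hrows, hzero⟩ := h
  refine ⟨by simpa [pvUpd] using hlen, ?_, ?_⟩
  · intro row hrow
    by_cases hr : r < dp.length
    · rcases List.mem_or_eq_of_mem_set hrow with hm | hm
      · exact hrows _ hm
      · subst hm
        rw [List.length_set]
        have hget : dp.getD r [] = dp[r] := by
          simp [List.getD_eq_getElem?_getD, List.getElem?_eq_getElem hr]
        rw [hget]
        exact hrows _ (List.getElem_mem hr)
    · rw [pvUpd, List.set_eq_of_length_le (by omega)] at hrow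
      exact hrows _ hrow
  · intro r' c' hlt
    rw [pvGet_upd]
    split_ifs with hcell
    · exact hz (by omega)
    · exact hzero _ _ hlt

-- the freshly built table reads 0 everywhere
theorem pvGet_init (l : List Int) (r c : Nat) :
    pvGet (l.map (fun _ => List.replicate 9 (0 : Int))) r c = 0 := by
  simp only [pvGet, List.getD_eq_getElem?_getD]
  by_cases hr : r < l.length
  · have h1 : (l.map (fun _ => List.replicate 9 (0 : Int)))[r]? = some (List.replicate 9 0) := by
      rw [List.getElem?_eq_getElem (by simpa using hr), List.getElem_map]
    rw [h1, Option.getD_some, List.getElem?_replicate]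
    split <;> rfl
  · have h1 : (l.map (fun _ => List.replicate 9 (0 : Int)))[r]? = none :=
      List.getElem?_eq_none (by simp; omega)
    rw [h1]
    simp

-- pvGood holds for A's table after all the loops, with n = k.toNat
theorem pvGood_final (k : Int) (_hk : 1 ≤ k) :
    pvGood k.toNat
      ((PySem.List.pyRange 1 9 1).foldl
        (fun dp col => (PySem.List.pyRange 1 k 1).foldl
          (fun dp row => pvUpd dp row.toNat col.toNat
            (pvGet dp (row.toNat - 1) (col.toNat - 1) + pvGet dp row.toNat (col.toNat - 1))) dp)
        ((PySem.List.pyRange 1 9 1).foldl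
          (fun dp col => pvUpd dp 0 col.toNat (1 + pvGet dp 0 (col.toNat - 1)))
          (pvUpd ((PySem.List.pyRange 0 k 1).map (fun _ => List.replicate 9 (0 : Int))) 0 0 1))) := by
  have h0 : pvGood k.toNat ((PySem.List.pyRange 0 k 1).map (fun _ => List.replicate 9 (0 : Int))) := by
    refine ⟨by simp [PySem.List.length_pyRange_one], ?_, fun r c _ => pvGet_init _ r c⟩
    intro row hrow
    simp only [List.mem_map] at hrow
    obtain ⟨_, _, hrow⟩ := hrow
    simp [← hrow]
  have h1 := pvGood_upd (r := 0) (c := 0) (v := 1) h0 (fun h => absurd h (Nat.not_lt_zero _))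
  have h2 := pvFoldlInv (pvGood k.toNat) _ (PySem.List.pyRange 1 9 1) _
    (fun dp col _ hg => pvGood_upd (r := 0) (c := col.toNat) (v := 1 + pvGet dp 0 (col.toNat - 1)) hg (fun h => absurd h (Nat.not_lt_zero _))) h1
  exact pvFoldlInv (pvGood k.toNat) _ (PySem.List.pyRange 1 9 1) _
    (fun dp col hcol hg => by
      have hcb := (PySem.List.mem_pyRange_one).1 hcol
      exact pvFoldlInv (pvGood k.toNat) _ (PySem.List.pyRange 1 k 1) _
        (fun dp row hrow hg' => by
          have hrb := (PySem.List.mem_pyRange_one).1 hrow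
          refine pvGood_upd hg' (fun hlt => ?_)
          have hz := hg'.2.2
          rw [hz _ _ (by omega), hz _ _ (by omega)]
          norm_num) hg) h2

-- A returns 0 for every k ≥ 10: the last row lies strictly below the table's diagonal
theorem pvA_large (k : Int) (hk : 10 ≤ k) : traverse_2d_array_6 k = 0 := by
  have hg := pvGood_final k (by omega)
  unfold traverse_2d_array_6
  simp only []
  set dp := ((PySem.List.pyRange 1 9 1).foldl
        (fun dp col => (PySem.List.pyRange 1 k 1).foldl
          (fun dp row => pvUpd dp row.toNat col.toNat
            (pvGet dp (row.toNat - 1) (col.toNat - 1) + pvGet dp row.toNat (col.toNat - 1))) dp)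
        ((PySem.List.pyRange 1 9 1).foldl
          (fun dp col => pvUpd dp 0 col.toNat (1 + pvGet dp 0 (col.toNat - 1)))
          (pvUpd ((PySem.List.pyRange 0 k 1).map (fun _ => List.replicate 9 (0 : Int))) 0 0 1))) with hdp
  obtain ⟨hlen, hrows, hzero⟩ := hg
  have hpos : 0 < dp.length := by omega
  have hrowidx : dp.length - 1 < dp.length := by omega
  have hget : PySem.List.pyGet? dp (-1) = some dp[dp.length - 1] := by
    rw [PySem.List.pyGet?_neg_one, List.getLast?_eq_getElem?, List.getElem?_eq_getElem hrowidx]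
  rw [hget]
  show (PySem.List.pyGet? (dp[dp.length - 1]) (-1)).getD 0 = 0
  have hrl : dp[dp.length - 1].length = 9 := hrows _ (List.getElem_mem hrowidx)
  have hz := hzero (dp.length - 1) 8 (by omega)
  simp only [pvGet, List.getD_eq_getElem?_getD, List.getElem?_eq_getElem hrowidx,
    Option.getD_some] at hz
  rw [PySem.List.pyGet?_neg_one, List.getLast?_eq_getElem?, hrl]
  simpa using hz

-- ===== VERDICT (by name: the statement is the Claim_ definition above) =====
theorem traverse_2d_array_6_spec : Claim_equal_traverse_2d_array_6 := by
  unfold Claim_equal_traverse_2d_array_6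
  intro k _ hk
  unfold Spec_traverse_2d_array_6
  unfold Pre_traverse_2d_array_6 at hk
  by_cases hbig : 10 ≤ k
  · rw [pvA_large k hbig]
    unfold traverse_2d_array_6_alt
    rw [if_pos (by omega)]
  · interval_cases k <;> decide
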